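-- pv_equiv track=rewrite | github.com/Reghius/snake | snake.py | create_canvas
-- ===== SOURCE A (Python) =====
-- def create_canvas(n, m, wall_sign=1):
--     '''
--     Creates a `n` by `m` playable area, with walls surrounding it
--     '''
--
--     canvas = []
--
--     for i in range(n):
--         column = []
--         for j in range(m):
--             if j <= m and i == 0 or \
--                j <= m and i == n-1 or \
--                j == 0 or \
--                j == m-1:
--                 column.append(1)
--             else:
--                 column.append(0)
--         canvas.append(column)
--
--     return canvas
-- ===== SOURCE B (Python) =====
-- def create_canvas(n, m, wall_sign=1):
--     '''
--     Creates a `n` by `m` playable area, with walls surrounding it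
--     '''
--     canvas = [[0] * m for _ in range(n)]
--     if n > 0 and m > 0:
--         canvas[0] = [1] * m
--         canvas[n - 1] = [1] * m
--         for row in canvas:
--             row[0] = 1
--             row[m - 1] = 1
--     return canvas
-- ===== Notes on version B (the rewrite author's own statement) =====
-- stated objective: simpler
-- what changed: Instead of deciding the border condition per cell inside nested append loops, B allocates an all-zero n-by-m grid in one comprehension and then paints the walls: replaces the first and last rows by [1]*m and sets the first and last entry of every row to 1.
import Mathlib
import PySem

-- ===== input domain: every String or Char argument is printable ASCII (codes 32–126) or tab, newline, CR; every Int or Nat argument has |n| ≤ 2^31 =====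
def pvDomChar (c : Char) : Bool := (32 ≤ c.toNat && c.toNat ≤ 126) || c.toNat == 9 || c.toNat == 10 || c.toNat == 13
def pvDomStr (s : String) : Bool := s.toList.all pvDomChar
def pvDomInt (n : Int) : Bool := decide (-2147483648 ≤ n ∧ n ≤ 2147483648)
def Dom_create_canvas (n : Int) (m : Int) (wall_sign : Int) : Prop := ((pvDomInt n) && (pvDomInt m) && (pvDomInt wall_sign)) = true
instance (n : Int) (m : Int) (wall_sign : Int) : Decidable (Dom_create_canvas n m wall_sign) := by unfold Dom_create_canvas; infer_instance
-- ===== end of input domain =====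

-- B builds the all-zero grid first and paints the walls in a second pass (simpler decomposition); wall_sign is unused, as in A.
-- ===== PORT A =====
def create_canvas (n : Int) (m : Int) (wall_sign : Int) : List (List Int) :=
  (PySem.List.pyRange 0 n 1).foldl (fun canvas i =>
    canvas ++ [ (PySem.List.pyRange 0 m 1).foldl (fun column j =>
      column ++ [ if (j ≤ m ∧ i = 0) ∨ (j ≤ m ∧ i = n - 1) ∨ j = 0 ∨ j = m - 1 then (1 : Int) else 0 ]) [] ]) []

-- ===== PORT B =====
def create_canvas_alt (n : Int) (m : Int) (wall_sign : Int) : List (List Int) :=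
  let canvas := (List.range n.toNat).map (fun _ => List.replicate m.toNat (0 : Int))
  if n > 0 ∧ m > 0 then
    let c1 := canvas.set 0 (List.replicate m.toNat (1 : Int))
    let c2 := c1.set (n - 1).toNat (List.replicate m.toNat (1 : Int))
    c2.map (fun row => (row.set 0 1).set (m - 1).toNat 1)
  else
    canvas

-- ===== PRECONDITION & SPEC =====
def Spec_create_canvas (n : Int) (m : Int) (wall_sign : Int) (out : List (List Int)) : Prop := out = create_canvas_alt n m wall_sign
instance (n : Int) (m : Int) (wall_sign : Int) (out : List (List Int)) : Decidable (Spec_create_canvas n m wall_sign out) := by unfold Spec_create_canvas; infer_instance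

-- ===== CLAIM (what is proved, stated in full; the proofs are below) =====
def Claim_equal_create_canvas : Prop := ∀ (n : Int) (m : Int) (wall_sign : Int), Dom_create_canvas n m wall_sign → Spec_create_canvas n m wall_sign (create_canvas n m wall_sign)

-- ===== LEMMAS AND PROOFS =====

-- A as a map of maps with the simplified border condition
theorem create_canvas_eq_map (n m wall_sign : Int) :
    create_canvas n m wall_sign =
      (PySem.List.pyRange 0 n 1).map (fun i =>
        (PySem.List.pyRange 0 m 1).map (fun j =>
          if i = 0 ∨ i = n - 1 ∨ j = 0 ∨ j = m - 1 then (1 : Int) else 0)) := by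
  unfold create_canvas
  simp only [PySem.List.foldl_append_singleton_eq_map, List.nil_append]
  apply List.map_congr_left; intro i _
  apply List.map_congr_left; intro j hj
  rw [PySem.List.mem_pyRange_one] at hj
  have hjm : j ≤ m := le_of_lt hj.2
  simp [hjm]

-- a border row of A, when the row index is 0 or n-1, is all ones
theorem rowA_one (n m i : Int) (hi : i = 0 ∨ i = n - 1) :
    (PySem.List.pyRange 0 m 1).map (fun j =>
        if i = 0 ∨ i = n - 1 ∨ j = 0 ∨ j = m - 1 then (1 : Int) else 0) =
      List.replicate m.toNat 1 := by
  apply List.ext_getElem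
  · simp [PySem.List.length_pyRange_one]
  · intro j hj1 hj2
    simp only [List.getElem_map, PySem.List.getElem_pyRange_one, List.getElem_replicate]
    rcases hi with h | h <;> simp [h]

-- B's painting of an all-one row is a no-op
theorem paint_ones (m : Int) :
    ((List.replicate m.toNat (1 : Int)).set 0 1).set (m - 1).toNat 1 =
      List.replicate m.toNat 1 := by
  simp [List.set_replicate_self]

-- an interior row of A equals B's painted zero row
theorem rowA_interior (n m i : Int) (hm : 0 < m) (h0 : ¬ i = 0) (h1 : ¬ i = n - 1) :
    (PySem.List.pyRange 0 m 1).map (fun j =>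
        if i = 0 ∨ i = n - 1 ∨ j = 0 ∨ j = m - 1 then (1 : Int) else 0) =
      ((List.replicate m.toNat (0 : Int)).set 0 1).set (m - 1).toNat 1 := by
  apply List.ext_getElem
  · simp [PySem.List.length_pyRange_one]
  · intro j hj1 hj2
    simp only [List.length_map, PySem.List.length_pyRange_one] at hj1
    simp only [List.getElem_map, PySem.List.getElem_pyRange_one, List.getElem_set,
      List.getElem_replicate, h0, h1, false_or]
    split_ifs <;> omega

theorem create_canvas_spec_aux (n m wall_sign : Int) :
    create_canvas n m wall_sign = create_canvas_alt n m wall_sign := by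
  rw [create_canvas_eq_map]
  unfold create_canvas_alt
  by_cases h : n > 0 ∧ m > 0
  · obtain ⟨hn, hm⟩ := h
    rw [if_pos ⟨hn, hm⟩]
    apply List.ext_getElem
    · simp [PySem.List.length_pyRange_one]
    · intro i hi1 hi2
      simp only [List.length_map, PySem.List.length_pyRange_one] at hi1
      simp only [List.getElem_map, PySem.List.getElem_pyRange_one, List.getElem_set, zero_add]
      split_ifs with h1 h2
      · -- last row: i = (n-1).toNat
        rw [paint_ones, rowA_one n m i (Or.inr (by omega))]
      · -- first row: i = 0
        rw [paint_ones, rowA_one n m i (Or.inl (by omega))]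
      · -- interior row
        exact rowA_interior n m i hm (by omega) (by omega)
  · rw [if_neg h]
    rw [PySem.List.pyRange_one (a := 0) (b := n)]
    simp only [List.map_map, sub_zero]
    apply List.map_congr_left
    intro k hk
    rw [List.mem_range] at hk
    have hm : m ≤ 0 := by
      by_contra hm'
      exact h ⟨by omega, by omega⟩
    simp [Function.comp, PySem.List.pyRange_one_eq_nil (by omega : m ≤ (0 : Int)),
      Int.toNat_of_nonpos hm]

-- ===== VERDICT (by name: the statement is the Claim_ definition above) =====
theorem create_canvas_spec : Claim_equal_create_canvas := by
  intro n m wall_sign _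
  unfold Spec_create_canvas
  exact create_canvas_spec_aux n m wall_sign
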